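-- pv_equiv track=rewrite | github.com/sencheng/CoBeL-spike | openfield/update_classes.py | sort_music_file
-- ===== SOURCE A (Python) =====
-- def sort_music_file(data_music):
--     block1 = data_music[0:2] # The first two lines can remain fixed
--     block2lines = [line for line in data_music if (line[0] == '[' or line[0] == ' ')] # List of data block lines
--     # block 2 needs to preserve order of lines within the data block
--     block2 = []
--     for i, line in enumerate(block2lines):
--         if line.startswith('['):
--             subblock = [line]
--             for subline in block2lines[i+1:]: # Picking the data entries for each block
--                 if subline.startswith('['): # New block starts
--                     break
--                 elif subline.startswith('  '): # data entries start with 2 spaces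
--                     subblock.append(subline)
--             block2.append(subblock)
--     block2 = sorted(block2) # sort the block using the first entries
--     block2 = [item for sublist in block2 for item in sublist] # Then flatten the list of subblocks back into a list of lines
--     data_music_sorted = block1
--     data_music_sorted.extend(block2)
--     block3 = data_music[len(data_music_sorted):] # Get the single line entries at the end of the file
--     block3 = sorted(block3)
--     data_music_sorted.extend(block3)
--     return data_music_sorted
-- ===== SOURCE B (Python) =====
-- def sort_music_file(data_music):
--     # One forward pass builds the subblocks, appending to the last open one.
--     blocks = []
--     for line in data_music:
--         if line.startswith('['):
--             blocks.append([line])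
--         elif blocks and line.startswith('  '):
--             blocks[-1].append(line)
--     flat = [entry for block in sorted(blocks) for entry in block]
--     head = data_music[:2]
--     tail = sorted(data_music[len(head) + len(flat):])
--     return head + flat + tail
-- ===== Notes on version B (the rewrite author's own statement) =====
-- stated objective: alternative
-- what changed: B builds the subblocks in one forward pass that appends each data line to the last open subblock, instead of A's filter pass plus a re-scan of the remaining filtered lines for every '[' header.
import Mathlib
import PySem

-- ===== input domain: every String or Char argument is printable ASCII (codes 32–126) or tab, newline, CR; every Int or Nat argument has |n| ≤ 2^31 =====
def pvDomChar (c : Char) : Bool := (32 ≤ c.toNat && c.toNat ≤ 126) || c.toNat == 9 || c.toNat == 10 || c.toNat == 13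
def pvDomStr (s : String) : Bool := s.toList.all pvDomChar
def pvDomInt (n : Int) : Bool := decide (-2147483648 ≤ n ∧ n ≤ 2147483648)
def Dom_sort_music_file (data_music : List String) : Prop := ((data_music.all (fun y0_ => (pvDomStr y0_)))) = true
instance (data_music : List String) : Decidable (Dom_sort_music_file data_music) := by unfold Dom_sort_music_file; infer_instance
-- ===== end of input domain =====

-- B replaces A's per-block re-scan of the filtered lines by one forward pass that appends
-- each data line to the last open subblock (objective: alternative single-pass grouping).

-- ===== PORT A =====
-- line[0] == '[' or line[0] == ' '  (none = IndexError on "", excluded by Pre_)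
def pvIsBlock2 (line : String) : Bool :=
  match PySem.Str.pyGet? line 0 with
  | some c => c == '[' || c == ' '
  | none => false

-- A's inner loop over block2lines[i+1:]: break on '[', collect '  ' lines, skip the rest
def pvInnerA : List String → List String
  | [] => []
  | s :: r =>
    if PySem.Str.startswith s "[" then []
    else if PySem.Str.startswith s "  " then s :: pvInnerA r
    else pvInnerA r

def sort_music_file (data_music : List String) : List String :=
  let block1 := PySem.List.slice data_music (some 0) (some 2)
  let block2lines := data_music.filter pvIsBlock2
  let block2 := (PySem.List.enumerate block2lines).foldl
    (fun acc p =>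
      if PySem.Str.startswith p.2 "[" then
        acc ++ [p.2 :: pvInnerA (PySem.List.slice block2lines (some (p.1 + 1)) none)]
      else acc) []
  let block2f := (PySem.List.sorted block2 (fun x => x) false).flatMap id
  let data_music_sorted := block1 ++ block2f
  let block3 := PySem.List.slice data_music (some (data_music_sorted.length : Int)) none
  data_music_sorted ++ PySem.List.sorted block3 (fun x => x) false

-- ===== PORT B =====
-- one step of B's single forward pass: open a new subblock on '[',
-- blocks[-1].append(line) on '  ' when a subblock is open
def pvStep (blocks : List (List String)) (line : String) : List (List String) :=
  if PySem.Str.startswith line "[" then blocks ++ [[line]]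
  else if !blocks.isEmpty && PySem.Str.startswith line "  " then
    blocks.dropLast ++ [blocks.getLastD [] ++ [line]]
  else blocks

def sort_music_file_alt (data_music : List String) : List String :=
  let blocks := data_music.foldl pvStep []
  let flat := (PySem.List.sorted blocks (fun x => x) false).flatMap id
  let head := PySem.List.slice data_music none (some 2)
  let tail := PySem.List.sorted
    (PySem.List.slice data_music (some ((head.length + flat.length : Nat) : Int)) none)
    (fun x => x) false
  head ++ flat ++ tail

-- ===== PRECONDITION & SPEC =====
-- Pre_ excludes lists containing the empty string, on which A raises IndexError at line[0].
def Pre_sort_music_file (data_music : List String) : Prop := "" ∉ data_music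
instance (data_music : List String) : Decidable (Pre_sort_music_file data_music) := by
  unfold Pre_sort_music_file; infer_instance

def pvWitness_sort_music_file : List String :=
  ["a = 1", "b = 2", "[s1]", "  x = 1", "[s0]", "  y = 2", "zz"]

def Spec_sort_music_file (data_music : List String) (out : List String) : Prop :=
  out = sort_music_file_alt data_music
instance (data_music : List String) (out : List String) : Decidable (Spec_sort_music_file data_music out) := by
  unfold Spec_sort_music_file; infer_instance

-- ===== CLAIM (what is proved, stated in full; the proofs are below) =====
def Claim_equal_sort_music_file : Prop := ∀ (data_music : List String),
  Dom_sort_music_file data_music → Pre_sort_music_file data_music →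
  Spec_sort_music_file data_music (sort_music_file data_music)

-- ===== LEMMAS AND PROOFS =====

-- canonical grouping: one subblock per '[' line, built from the whole remaining suffix
def pvArec : List String → List (List String)
  | [] => []
  | l :: r => (if PySem.Str.startswith l "[" then [l :: pvInnerA r] else []) ++ pvArec r

lemma pvSw_bracket (l : String) : PySem.Str.startswith l "[" = PySem.Chars.startswith l.toList ['['] := by
  simp

lemma pvSw_spaces (l : String) : PySem.Str.startswith l "  " = PySem.Chars.startswith l.toList [' ', ' '] := by
  simp

lemma pvStep_skip (x : String) (h1 : PySem.Str.startswith x "[" = false)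
    (h2 : PySem.Str.startswith x "  " = false) (acc : List (List String)) :
    pvStep acc x = acc := by
  rw [pvSw_bracket] at h1
  rw [pvSw_spaces] at h2
  unfold pvStep; simp [h1, h2]

lemma pvIsBlock2_false_startswith (x : String) (h : pvIsBlock2 x = false) :
    PySem.Str.startswith x "[" = false ∧ PySem.Str.startswith x "  " = false := by
  unfold pvIsBlock2 at h
  rcases hc : x.toList with _ | ⟨c, cs⟩
  · constructor <;>
    · rw [Bool.eq_false_iff]
      intro hsw
      have := (PySem.Chars.startswith_iff _ _).1 (by simpa [hc] using hsw)
      simp at this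
  · have hget : PySem.Str.pyGet? x 0 = some c := by
      have : PySem.Str.pyGet? x ((0 : Nat) : Int) = x.toList[(0 : Nat)]? := PySem.Str.pyGet?_natCast x 0
      rw [hc] at this
      simpa using this
    rw [hget] at h
    simp only [Bool.or_eq_false_iff, beq_eq_false_iff_ne] at h
    constructor <;>
    · rw [Bool.eq_false_iff]
      intro hsw
      have := (PySem.Chars.startswith_iff _ _).1 (by simpa [hc] using hsw)
      rcases this with ⟨t, ht⟩
      simp at ht
      simp [← ht.1] at h

-- B's fold over all of data_music equals B's fold over the filtered lines
lemma pvFoldB_filter (data : List String) (b : List (List String)) :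
    data.foldl pvStep b = (data.filter pvIsBlock2).foldl pvStep b := by
  rw [List.foldl_filter]
  induction data generalizing b with
  | nil => rfl
  | cons l t ih =>
    simp only [List.foldl_cons]
    by_cases h : pvIsBlock2 l = true
    · rw [if_pos h]; exact ih _
    · have h' := pvIsBlock2_false_startswith l (by simpa using h)
      rw [if_neg h, pvStep_skip l h'.1 h'.2]
      exact ih _

-- B's fold with an open last subblock: the open block absorbs pvInnerA of the suffix
lemma pvFoldB_open (s : List String) : ∀ (bs : List (List String)) (c : List String),
    s.foldl pvStep (bs ++ [c]) = bs ++ [c ++ pvInnerA s] ++ pvArec s := by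
  induction s with
  | nil => intro bs c; simp [pvInnerA, pvArec]
  | cons l t ih =>
    intro bs c
    by_cases h1 : PySem.Str.startswith l "[" = true
    · have c1 : PySem.Chars.startswith l.toList ['['] = true := (pvSw_bracket l) ▸ h1
      have hstep : pvStep (bs ++ [c]) l = (bs ++ [c]) ++ [[l]] := by
        unfold pvStep; simp [c1]
      simp only [List.foldl_cons, hstep, ih (bs ++ [c]) [l], pvInnerA, pvArec, h1]
      simp
    · have h1' : PySem.Str.startswith l "[" = false := by simpa using h1
      have c1 : PySem.Chars.startswith l.toList ['['] = false := (pvSw_bracket l) ▸ h1'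
      by_cases h2 : PySem.Str.startswith l "  " = true
      · have c2 : PySem.Chars.startswith l.toList [' ', ' '] = true := (pvSw_spaces l) ▸ h2
        have hstep : pvStep (bs ++ [c]) l = bs ++ [c ++ [l]] := by
          unfold pvStep
          simp [c1, c2]
        simp only [List.foldl_cons, hstep, ih bs (c ++ [l]), pvInnerA, pvArec, h1', h2]
        simp
      · have h2' : PySem.Str.startswith l "  " = false := by simpa using h2
        simp only [List.foldl_cons, pvStep_skip l h1' h2', ih bs c, pvInnerA, pvArec, h1', h2']
        simp

-- B's fold from the empty block list computes the canonical grouping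
lemma pvFoldB_nil (s : List String) : s.foldl pvStep [] = pvArec s := by
  induction s with
  | nil => rfl
  | cons l t ih =>
    by_cases h1 : PySem.Str.startswith l "[" = true
    · have c1 : PySem.Chars.startswith l.toList ['['] = true := (pvSw_bracket l) ▸ h1
      have hstep : pvStep [] l = [] ++ [[l]] := by unfold pvStep; simp [c1]
      simp only [List.foldl_cons, hstep, pvFoldB_open t [] [l], pvArec, h1]
      simp
    · have h1' : PySem.Str.startswith l "[" = false := by simpa using h1
      have c1 : PySem.Chars.startswith l.toList ['['] = false := (pvSw_bracket l) ▸ h1'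
      have hstep : pvStep [] l = [] := by unfold pvStep; simp [c1]
      simp only [List.foldl_cons, hstep, ih, pvArec, h1']
      simp

-- A's enumerate-and-reslice loop computes the canonical grouping of the same list
lemma pvFoldA (L : List String) : ∀ (s : List String) (k : Nat), s = L.drop k →
    ∀ (acc : List (List String)),
    (PySem.List.enumerate s (k : Int)).foldl
      (fun acc p =>
        if PySem.Str.startswith p.2 "[" then
          acc ++ [p.2 :: pvInnerA (PySem.List.slice L (some (p.1 + 1)) none)]
        else acc) acc = acc ++ pvArec s := by
  intro s
  induction s with
  | nil => intro k _ acc; simp [PySem.List.enumerate, pvArec]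
  | cons l t ih =>
    intro k hk acc
    have hdropk1 : t = L.drop (k + 1) := by
      have := congrArg List.tail hk
      simpa [List.tail_drop] using this
    have hslice : PySem.List.slice L (some ((k : Int) + 1)) none = t := by
      rw [PySem.List.slice_from L (by omega : (0:Int) ≤ (k : Int) + 1)]
      have : ((k : Int) + 1).toNat = k + 1 := by omega
      rw [this, ← hdropk1]
    rw [PySem.List.enumerate_cons, List.foldl_cons]
    have hcast : (k : Int) + 1 = ((k + 1 : Nat) : Int) := by push_cast; ring
    by_cases h1 : PySem.Str.startswith l "[" = true
    · rw [if_pos h1, hcast, ih (k + 1) hdropk1]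
      simp [pvArec, (pvSw_bracket l) ▸ h1, hslice]
    · have h1' : PySem.Str.startswith l "[" = false := by simpa using h1
      have c1 : PySem.Chars.startswith l.toList ['['] = false := (pvSw_bracket l) ▸ h1'
      rw [if_neg (by simp [c1]), hcast, ih (k + 1) hdropk1]
      simp [pvArec, c1]

-- the two slice spellings of the first two lines agree
lemma pvHead_eq (data : List String) :
    PySem.List.slice data (some 0) (some 2) = PySem.List.slice data none (some 2) := by
  simp [PySem.List.slice]

-- main equality: the two ports agree on every input
lemma pv_main (data : List String) : sort_music_file data = sort_music_file_alt data := by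
  simp only [sort_music_file, sort_music_file_alt]
  have hblocks : data.foldl pvStep [] = pvArec (data.filter pvIsBlock2) := by
    rw [pvFoldB_filter data [], pvFoldB_nil]
  have hA := pvFoldA (data.filter pvIsBlock2) (data.filter pvIsBlock2) 0 (by simp) []
  simp only [Nat.cast_zero] at hA
  rw [hA, hblocks, pvHead_eq]
  simp only [List.nil_append]
  have hlen : ((PySem.List.slice data none (some 2) ++
      (PySem.List.sorted (pvArec (data.filter pvIsBlock2)) (fun x => x) false).flatMap id).length : Int)
      = (((PySem.List.slice data none (some 2)).length +
      ((PySem.List.sorted (pvArec (data.filter pvIsBlock2)) (fun x => x) false).flatMap id).length : Nat) : Int) := by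
    push_cast [List.length_append]; ring
  rw [hlen]

-- ===== VERDICT (by name: the statement is the Claim_ definition above) =====
theorem sort_music_file_spec : Claim_equal_sort_music_file := by
  intro data _ _
  unfold Spec_sort_music_file
  exact pv_main data
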